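-- pv_equiv track=rewrite | github.com/Jianlllll/ModelCompressionPoweredByMMRAZOR | tools/tmp_ModelShape.py | detect_root_prefix
-- ===== SOURCE A (Python) =====
-- from typing import Dict, Iterable, List, Optional, Tuple
--
-- def detect_root_prefix(keys: Iterable[str]) -> Optional[str]:
--     """Detect the base prefix for HRNet backbone keys.
--
--     Try common patterns: '', 'backbone.', 'architecture.backbone.', 'teacher.backbone.'.
--     """
--     candidates = [
--         "",
--         "backbone.",
--         "architecture.backbone.",
--         "teacher.backbone.",
--         "student.backbone.",
--     ]
--     keys_list = list(keys)
--     for pre in candidates: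
--         if any(k.startswith(pre + "stage2.") for k in keys_list) or any(
--             k.startswith(pre + "layer1.") for k in keys_list
--         ):
--             return pre
--     return None
-- ===== SOURCE B (Python) =====
-- def detect_root_prefix(keys):
--     """Single pass over keys: extract the prefix before the first 'stage2.'/'layer1.'
--     marker, collect those that are known candidates, then pick by priority."""
--     priority = ["", "backbone.", "architecture.backbone.", "teacher.backbone.", "student.backbone."]
--     candidates = set(priority)
--     found = set()
--     for k in keys:
--         for marker in ("stage2.", "layer1."):
--             i = k.find(marker)
--             if i != -1:
--                 pre = k[:i]
--                 if pre in candidates: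
--                     found.add(pre)
--     for pre in priority:
--         if pre in found:
--             return pre
--     return None
-- ===== Notes on version B (the rewrite author's own statement) =====
-- stated objective: faster
-- what changed: Replaces A's per-candidate startswith scan over all keys (up to 10 full scans) by one pass over the keys that extracts the substring before the first 'stage2.'/'layer1.' occurrence into a found-set of known candidates, then picks the first found candidate in priority order.
import Mathlib
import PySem

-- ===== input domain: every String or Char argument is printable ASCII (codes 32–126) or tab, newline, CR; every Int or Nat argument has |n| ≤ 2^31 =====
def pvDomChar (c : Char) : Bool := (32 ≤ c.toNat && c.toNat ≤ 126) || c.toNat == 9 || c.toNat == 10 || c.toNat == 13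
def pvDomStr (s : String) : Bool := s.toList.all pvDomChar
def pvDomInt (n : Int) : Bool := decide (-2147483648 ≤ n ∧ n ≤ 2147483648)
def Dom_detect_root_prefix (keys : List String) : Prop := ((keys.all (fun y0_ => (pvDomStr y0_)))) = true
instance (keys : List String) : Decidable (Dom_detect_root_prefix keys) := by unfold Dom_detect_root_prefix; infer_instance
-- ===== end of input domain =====

-- B changes the decomposition: one pass over the keys extracting the prefix before the
-- first 'stage2.'/'layer1.' marker into a found-set, then a priority pick — instead of
-- A's scan of all keys per candidate prefix.

-- ===== PORT A =====
-- the early-return for-loop over the candidate list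
def pvAloop (keysList : List String) : List String → Option String
  | [] => none
  | pre :: rest =>
    if (keysList.any (fun k => PySem.Str.startswith k (pre ++ "stage2.")) ||
        keysList.any (fun k => PySem.Str.startswith k (pre ++ "layer1."))) then some pre
    else pvAloop keysList rest

def detect_root_prefix (keys : List String) : Option String :=
  pvAloop keys ["", "backbone.", "architecture.backbone.", "teacher.backbone.", "student.backbone."]

-- ===== PORT B =====
def pvPriority : List String :=
  ["", "backbone.", "architecture.backbone.", "teacher.backbone.", "student.backbone."]

def pvMarkers : List String := ["stage2.", "layer1."]

-- body of B's single pass: for each marker, k.find(marker); if hit, keep k[:i] when it is a candidate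
def pvScanKey (found : PySem.Set String) (k : String) : PySem.Set String :=
  pvMarkers.foldl (fun fd marker =>
    if PySem.Str.find k marker ≠ -1 then
      (if PySem.Set.contains (PySem.Set.ofList pvPriority) (PySem.Str.slice k none (some (PySem.Str.find k marker))) then
        PySem.Set.add fd (PySem.Str.slice k none (some (PySem.Str.find k marker)))
      else fd)
    else fd) found

-- B's final loop: first priority element present in the found-set
def pvPick (found : PySem.Set String) : List String → Option String
  | [] => none
  | pre :: rest => if PySem.Set.contains found pre then some pre else pvPick found rest

def detect_root_prefix_alt (keys : List String) : Option String :=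
  pvPick (keys.foldl pvScanKey PySem.Set.empty) pvPriority

-- ===== PRECONDITION & SPEC =====
def Spec_detect_root_prefix (keys : List String) (out : Option String) : Prop := out = detect_root_prefix_alt keys
instance (keys : List String) (out : Option String) : Decidable (Spec_detect_root_prefix keys out) := by unfold Spec_detect_root_prefix; infer_instance

-- ===== CLAIM (what is proved, stated in full; the proofs are below) =====
def Claim_equal_detect_root_prefix : Prop := ∀ (keys : List String), Dom_detect_root_prefix keys → Spec_detect_root_prefix keys (detect_root_prefix keys)

-- ===== LEMMAS AND PROOFS =====

-- 'key k contributes prefix x in B's pass'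
def pvAdds (k x : String) : Prop :=
  ∃ m ∈ pvMarkers, PySem.Str.find k m ≠ -1 ∧
    PySem.Str.slice k none (some (PySem.Str.find k m)) = x ∧ x ∈ pvPriority

-- A's condition for candidate pre
def pvCondA (keys : List String) (pre : String) : Bool :=
  keys.any (fun k => PySem.Str.startswith k (pre ++ "stage2.")) ||
  keys.any (fun k => PySem.Str.startswith k (pre ++ "layer1."))

-- no marker occurs inside (pre ++ marker) strictly before position |pre| (10 concrete facts)
lemma pvNoEarly : ∀ pre ∈ pvPriority, ∀ m ∈ pvMarkers,
    ∀ j < pre.toList.length, ¬ m.toList <+: ((pre.toList ++ m.toList).drop j) := by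
  decide

lemma pvStep (fd : PySem.Set String) (k m x : String) :
    x ∈ (if PySem.Str.find k m ≠ -1 then
      (if PySem.Set.contains (PySem.Set.ofList pvPriority) (PySem.Str.slice k none (some (PySem.Str.find k m))) then
        PySem.Set.add fd (PySem.Str.slice k none (some (PySem.Str.find k m)))
      else fd)
    else fd) ↔
    x ∈ fd ∨ (PySem.Str.find k m ≠ -1 ∧
      PySem.Str.slice k none (some (PySem.Str.find k m)) = x ∧ x ∈ pvPriority) := by
  by_cases h1 : PySem.Str.find k m ≠ -1
  · rw [if_pos h1]
    by_cases h2 : PySem.Str.slice k none (some (PySem.Str.find k m)) ∈ pvPriority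
    · have hc : PySem.Set.contains (PySem.Set.ofList pvPriority)
          (PySem.Str.slice k none (some (PySem.Str.find k m))) = true :=
        (PySem.Set.contains_iff _ _).mpr ((PySem.Set.mem_ofList _ _).mpr h2)
      rw [if_pos hc, PySem.Set.mem_add]
      constructor
      · rintro (h | h)
        · exact Or.inl h
        · exact Or.inr ⟨h1, h.symm, h ▸ h2⟩
      · rintro (h | ⟨_, h, _⟩)
        · exact Or.inl h
        · exact Or.inr h.symm
    · have hc : ¬ (PySem.Set.contains (PySem.Set.ofList pvPriority)
          (PySem.Str.slice k none (some (PySem.Str.find k m))) = true) := fun hcc =>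
        h2 ((PySem.Set.mem_ofList _ _).mp ((PySem.Set.contains_iff _ _).mp hcc))
      rw [if_neg hc]
      constructor
      · exact Or.inl
      · rintro (h | ⟨_, h, hx⟩)
        · exact h
        · exact absurd (h ▸ hx) h2
  · rw [if_neg h1]
    constructor
    · exact Or.inl
    · rintro (h | ⟨h, _⟩)
      · exact h
      · exact absurd h h1

lemma pvAdds_cases (k x : String) :
    pvAdds k x ↔
      (PySem.Str.find k "stage2." ≠ -1 ∧
        PySem.Str.slice k none (some (PySem.Str.find k "stage2.")) = x ∧ x ∈ pvPriority) ∨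
      (PySem.Str.find k "layer1." ≠ -1 ∧
        PySem.Str.slice k none (some (PySem.Str.find k "layer1.")) = x ∧ x ∈ pvPriority) := by
  constructor
  · rintro ⟨m, hm, h⟩
    simp only [pvMarkers, List.mem_cons, List.not_mem_nil, or_false] at hm
    rcases hm with rfl | rfl
    · exact Or.inl h
    · exact Or.inr h
  · rintro (h | h)
    · exact ⟨"stage2.", by simp [pvMarkers], h⟩
    · exact ⟨"layer1.", by simp [pvMarkers], h⟩

lemma pvMem_scanKey (found : PySem.Set String) (k x : String) :
    x ∈ pvScanKey found k ↔ x ∈ found ∨ pvAdds k x := by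
  simp only [pvScanKey, pvMarkers, List.foldl_cons, List.foldl_nil]
  rw [pvStep, pvStep, pvAdds_cases, or_assoc]

lemma pvMem_fold (keys : List String) (found : PySem.Set String) (x : String) :
    x ∈ keys.foldl pvScanKey found ↔ x ∈ found ∨ ∃ k ∈ keys, pvAdds k x := by
  induction keys generalizing found with
  | nil => simp
  | cons k rest ih =>
    simp only [List.foldl_cons, ih, pvMem_scanKey, List.mem_cons]
    constructor
    · rintro ((h | h) | ⟨k', hk', h⟩)
      · exact Or.inl h
      · exact Or.inr ⟨k, Or.inl rfl, h⟩
      · exact Or.inr ⟨k', Or.inr hk', h⟩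
    · rintro (h | ⟨k', (rfl | hk'), h⟩)
      · exact Or.inl (Or.inl h)
      · exact Or.inl (Or.inr h)
      · exact Or.inr ⟨k', hk', h⟩

-- the crux: extraction at the first marker occurrence ↔ startswith, for candidate prefixes
-- list-level crux: with no early marker occurrence, find lands exactly at |p|
lemma pvFind_char (s p mm : List Char)
    (hne : ∀ j < p.length, ¬ mm <+: ((p ++ mm).drop j)) :
    (PySem.Chars.find s mm ≠ -1 ∧ s.take (PySem.Chars.find s mm).toNat = p) ↔
    (p ++ mm) <+: s := by
  constructor
  · rintro ⟨h1, h2⟩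
    have h0 : 0 ≤ PySem.Chars.find s mm := by
      have := PySem.Chars.neg_one_le_find s mm; omega
    obtain ⟨hp, -⟩ := PySem.Chars.find_spec h0
    obtain ⟨t, ht⟩ := hp
    refine ⟨t, ?_⟩
    rw [← h2, List.append_assoc, ht, List.take_append_drop]
  · intro hp
    obtain ⟨t, ht⟩ := hp
    have hdrop : s.drop p.length = mm ++ t := by
      rw [← ht, List.append_assoc, List.drop_left]
    have hmmp : mm <+: s.drop p.length := hdrop ▸ List.prefix_append mm t
    have h1 : PySem.Chars.find s mm ≠ -1 := by
      rw [PySem.Chars.find_ne_neg_one_iff, ← PySem.Chars.isIn_iff_infix,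
        ← PySem.Chars.exists_prefix_drop_iff_isIn]
      exact ⟨p.length, hmmp⟩
    have h0 : 0 ≤ PySem.Chars.find s mm := by
      have := PySem.Chars.neg_one_le_find s mm; omega
    obtain ⟨hat, hmin⟩ := PySem.Chars.find_spec h0
    have hle : (PySem.Chars.find s mm).toNat ≤ p.length := by
      by_contra hgt
      exact hmin p.length (by omega) hmmp
    have hge : ¬ (PySem.Chars.find s mm).toNat < p.length := by
      intro hlt
      apply hne (PySem.Chars.find s mm).toNat hlt
      -- mm is a prefix of s.drop i = (p++mm).drop i ++ t, and |(p++mm).drop i| ≥ |mm|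
      set i := (PySem.Chars.find s mm).toNat with hi
      have hsub : i - (p ++ mm).length = 0 := by
        simp only [List.length_append]; omega
      have hsdrop : s.drop i = (p ++ mm).drop i ++ t := by
        rw [← ht, List.drop_append, hsub, List.drop_zero]
      rw [hsdrop] at hat
      have hlen : mm.length ≤ ((p ++ mm).drop (PySem.Chars.find s mm).toNat).length := by
        simp only [List.length_drop, List.length_append]; omega
      rw [List.prefix_iff_eq_take] at hat ⊢
      rw [List.take_append, Nat.sub_eq_zero_of_le hlen, List.take_zero, List.append_nil] at hat
      exact hat
    have hi : (PySem.Chars.find s mm).toNat = p.length := by omega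
    refine ⟨h1, ?_⟩
    rw [hi]
    have : p <+: s := ⟨mm ++ t, by rw [← List.append_assoc, ht]⟩
    exact (List.prefix_iff_eq_take.mp this).symm

lemma pvAdds_once (k pre m : String) (hpre : pre ∈ pvPriority) (hm : m ∈ pvMarkers) :
    (PySem.Str.find k m ≠ -1 ∧ PySem.Str.slice k none (some (PySem.Str.find k m)) = pre) ↔
    PySem.Str.startswith k (pre ++ m) = true := by
  rw [PySem.Str.startswith_eq, PySem.Chars.startswith_iff, String.toList_append]
  rw [← pvFind_char k.toList pre.toList m.toList (pvNoEarly pre hpre m hm)]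
  rw [PySem.Str.find_eq]
  constructor
  · rintro ⟨h1, h2⟩
    have h0' : (0:Int) ≤ PySem.Chars.find k.toList m.toList := by
      have := PySem.Chars.neg_one_le_find k.toList m.toList; omega
    rw [← String.toList_inj, PySem.Str.toList_slice, PySem.Chars.slice_eq_listSlice,
      PySem.List.slice_to _ h0'] at h2
    exact ⟨h1, h2⟩
  · rintro ⟨h1, h2⟩
    have h0' : (0:Int) ≤ PySem.Chars.find k.toList m.toList := by
      have := PySem.Chars.neg_one_le_find k.toList m.toList; omega
    refine ⟨h1, ?_⟩
    rw [← String.toList_inj, PySem.Str.toList_slice, PySem.Chars.slice_eq_listSlice,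
      PySem.List.slice_to _ h0']
    exact h2

lemma pvAdds_iff (k pre : String) (hpre : pre ∈ pvPriority) :
    pvAdds k pre ↔ (PySem.Str.startswith k (pre ++ "stage2.") = true ∨
                    PySem.Str.startswith k (pre ++ "layer1.") = true) := by
  rw [pvAdds_cases]
  rw [← pvAdds_once k pre "stage2." hpre (by simp [pvMarkers]),
      ← pvAdds_once k pre "layer1." hpre (by simp [pvMarkers])]
  constructor
  · rintro (⟨h1, h2, -⟩ | ⟨h1, h2, -⟩)
    · exact Or.inl ⟨h1, h2⟩
    · exact Or.inr ⟨h1, h2⟩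
  · rintro (⟨h1, h2⟩ | ⟨h1, h2⟩)
    · exact Or.inl ⟨h1, h2, hpre⟩
    · exact Or.inr ⟨h1, h2, hpre⟩

lemma pvContains_eq_condA (keys : List String) (pre : String) (hpre : pre ∈ pvPriority) :
    PySem.Set.contains (keys.foldl pvScanKey PySem.Set.empty) pre = pvCondA keys pre := by
  rw [Bool.eq_iff_iff, PySem.Set.contains_iff, pvMem_fold]
  simp only [pvCondA, Bool.or_eq_true, List.any_eq_true]
  constructor
  · rintro (h | ⟨k, hk, h⟩)
    · exact absurd h (List.not_mem_nil)
    · rcases (pvAdds_iff k pre hpre).mp h with h' | h'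
      · exact Or.inl ⟨k, hk, h'⟩
      · exact Or.inr ⟨k, hk, h'⟩
  · rintro (⟨k, hk, h⟩ | ⟨k, hk, h⟩)
    · exact Or.inr ⟨k, hk, (pvAdds_iff k pre hpre).mpr (Or.inl h)⟩
    · exact Or.inr ⟨k, hk, (pvAdds_iff k pre hpre).mpr (Or.inr h)⟩

lemma pvPick_eq_aloop (keys : List String) (found : PySem.Set String) :
    ∀ l : List String, (∀ pre ∈ l, PySem.Set.contains found pre = pvCondA keys pre) →
      pvPick found l = pvAloop keys l := by
  intro l
  induction l with
  | nil => intro _; rfl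
  | cons pre rest ih =>
    intro h
    have h1 := h pre (by simp)
    simp only [pvPick, pvAloop, h1, pvCondA]
    split <;> [rfl; exact ih (fun p hp => h p (by simp [hp]))]

-- ===== VERDICT (by name: the statement is the Claim_ definition above) =====
theorem detect_root_prefix_spec : Claim_equal_detect_root_prefix := by
  intro keys _
  unfold Spec_detect_root_prefix detect_root_prefix detect_root_prefix_alt
  exact (pvPick_eq_aloop keys _ pvPriority
    (fun pre hpre => pvContains_eq_condA keys pre hpre)).symm ▸ rfl
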